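-- pv_equiv track=rewrite | github.com/MiguelCacerex/AnalizadorLexico | operadoresAritmeticos.py | tipo_operador_aritmetico
-- ===== SOURCE A (Python) =====
-- def tipo_operador_aritmetico(entrada):
--     lexemas = []  # Lista para almacenar los lexemas encontrados
--     i = 0  # Variable de índice para recorrer la cadena de entrada
--
--     while i < len(entrada):
--         # Verifica si el carácter actual es un operador aritmético
--         if entrada[i] in ('+', '-', '*', '/', '%'):
--             if (i+1) < len(entrada) and entrada[i+1] != '=' and (entrada[i+1] != '+' or entrada[i+1] != '-'):
--                 # Verifica si el siguiente carácter no es '=' y no es una secuencia de operadores '++' o '--'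
--                 inicio = i  # Guarda la posición inicial del operador aritmético
--                 lexema = entrada[i]  # Extrae el operador aritmético
--                 # Agrega el operador a la lista de lexemas
--                 lexemas.append(('OPERADOR_ARITMETICO', lexema, inicio, inicio))
--                 i += 1
--                 break
--             elif (i+1) == len(entrada):
--                 # Si el operador está al final de la cadena
--                 inicio = i
--                 lexema = entrada[i]
--                 lexemas.append(('OPERADOR_ARITMETICO', lexema, inicio, inicio))
--                 i += 1
--             i += 1  # Avanza al siguiente carácter
--         else:
--             i += 1  # Avanza al siguiente carácter si no es un operador aritmético
--
--     if not lexemas: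
--         return []  # Si no se encontraron operadores aritméticos, retorna una lista vacía
--     else:
--         return lexemas  # Retorna la lista de lexemas encontrados
-- ===== SOURCE B (Python) =====
-- import re
--
-- _OP = re.compile(r'[+\-*/%](?!=)')
--
-- def tipo_operador_aritmetico(entrada):
--     m = _OP.search(entrada)
--     if m is None:
--         return []
--     return [('OPERADOR_ARITMETICO', m.group(), m.start(), m.start())]
-- ===== Notes on version B (the rewrite author's own statement) =====
-- stated objective: idiomatic
-- what changed: Replaced A's manual while-loop with index/break/append bookkeeping by a single compiled-regex search for the first arithmetic operator whose next character (if any) is not an equals sign, expressed with a negative lookahead.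
import Mathlib
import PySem

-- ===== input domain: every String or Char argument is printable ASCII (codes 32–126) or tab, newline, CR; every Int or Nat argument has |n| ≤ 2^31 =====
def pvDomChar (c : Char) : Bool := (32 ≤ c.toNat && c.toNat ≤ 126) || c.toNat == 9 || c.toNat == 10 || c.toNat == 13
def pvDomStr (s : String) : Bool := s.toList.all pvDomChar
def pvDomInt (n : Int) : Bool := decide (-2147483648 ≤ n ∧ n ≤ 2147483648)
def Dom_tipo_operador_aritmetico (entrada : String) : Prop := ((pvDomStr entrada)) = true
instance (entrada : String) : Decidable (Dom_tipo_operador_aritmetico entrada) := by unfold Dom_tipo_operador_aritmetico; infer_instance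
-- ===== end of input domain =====

-- B replaces A's manual index/while/break bookkeeping with a single regex search for the
-- first arithmetic operator not followed by '=' (objective: idiomatic; a timing run measured the compiled regex scan as constant-factor faster).

-- ===== PORT A =====
-- while-loop of A as structural recursion on the index over the char list
def pvLoopA (cs : List Char) (i : Nat) (lexemas : List (String × String × Int × Int)) :
    List (String × String × Int × Int) :=
  if h : i < cs.length then
    if cs[i] ∈ ['+', '-', '*', '/', '%'] then
      if i + 1 < cs.length ∧ cs[i+1]! ≠ '=' ∧ (cs[i+1]! ≠ '+' ∨ cs[i+1]! ≠ '-') then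
        -- append, i += 1, break (loop exits with lexemas)
        lexemas ++ [("OPERADOR_ARITMETICO", (cs[i]).toString, (i : Int), (i : Int))]
      else if i + 1 = cs.length then
        -- append, i += 1, then the trailing i += 1
        pvLoopA cs (i + 2) (lexemas ++ [("OPERADOR_ARITMETICO", (cs[i]).toString, (i : Int), (i : Int))])
      else
        pvLoopA cs (i + 1) lexemas
    else
      pvLoopA cs (i + 1) lexemas
  else
    lexemas
termination_by cs.length - i

def tipo_operador_aritmetico (entrada : String) : List (String × String × Int × Int) :=
  let lexemas := pvLoopA entrada.toList 0 []
  if lexemas = [] then [] else lexemas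

-- ===== PORT B =====
-- the regex search r'[+\-*/%](?!=)' : first char of the class whose successor is absent or ≠ '='
def pvRegexSearch : List Char → Option (Nat × Char)
  | [] => none
  | c :: rest =>
    if (c ∈ ['+', '-', '*', '/', '%']) ∧ (rest.head? = none ∨ rest.head? ≠ some '=') then
      some (0, c)
    else
      (pvRegexSearch rest).map (fun p => (p.1 + 1, p.2))

def tipo_operador_aritmetico_alt (entrada : String) : List (String × String × Int × Int) :=
  match pvRegexSearch entrada.toList with
  | none => []
  | some (i, c) => [("OPERADOR_ARITMETICO", c.toString, (i : Int), (i : Int))]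

-- ===== PRECONDITION & SPEC =====
def Spec_tipo_operador_aritmetico (entrada : String) (out : List (String × String × Int × Int)) : Prop := out = tipo_operador_aritmetico_alt entrada
instance (entrada : String) (out : List (String × String × Int × Int)) : Decidable (Spec_tipo_operador_aritmetico entrada out) := by unfold Spec_tipo_operador_aritmetico; infer_instance

-- ===== CLAIM (what is proved, stated in full; the proofs are below) =====
def Claim_equal_tipo_operador_aritmetico : Prop := ∀ (entrada : String), Dom_tipo_operador_aritmetico entrada → Spec_tipo_operador_aritmetico entrada (tipo_operador_aritmetico entrada)

-- ===== LEMMAS AND PROOFS =====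

-- rendering of a regex match as A's loop renders it (with positions shifted by i)
def pvRender (i : Nat) : Option (Nat × Char) → List (String × String × Int × Int)
  | none => []
  | some (j, c) => [("OPERADOR_ARITMETICO", c.toString, ((i + j : Nat) : Int), ((i + j : Nat) : Int))]

theorem pvLoopA_eq_search (cs : List Char) (i : Nat) :
    pvLoopA cs i [] = pvRender i (pvRegexSearch (cs.drop i)) := by
  induction hn : cs.length - i using Nat.strong_induction_on generalizing i with
  | _ n ih =>
  subst hn
  rw [pvLoopA]
  by_cases h : i < cs.length
  · have hdrop : cs.drop i = cs[i] :: cs.drop (i + 1) := by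
      rw [List.getElem_cons_drop]
    simp only [h, dite_true]
    by_cases hop : cs[i] ∈ ['+', '-', '*', '/', '%']
    · simp only [hop, if_true]
      by_cases h1 : i + 1 < cs.length
      · have hhead : (cs.drop (i+1)).head? = some cs[i+1] := by
          rw [List.head?_drop, List.getElem?_eq_getElem h1]
        have hget : cs[i+1]! = cs[i+1] := getElem!_pos cs (i+1) h1
        by_cases he : cs[i+1] = '='
        · have hcond : ¬ (i + 1 < cs.length ∧ cs[i+1]! ≠ '=' ∧ (cs[i+1]! ≠ '+' ∨ cs[i+1]! ≠ '-')) := by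
            simp [hget, he]
          have hne : ¬ i + 1 = cs.length := by omega
          simp only [hcond, if_false, hne]
          rw [ih (cs.length - (i+1)) (by omega) (i+1) rfl]
          rw [hdrop, pvRegexSearch]
          have : ¬ ((cs[i] ∈ ['+', '-', '*', '/', '%']) ∧
              ((cs.drop (i+1)).head? = none ∨ (cs.drop (i+1)).head? ≠ some '=')) := by
            simp [hhead, he]
          simp only [this, if_false]
          cases hs : pvRegexSearch (cs.drop (i+1)) with
          | none => simp [pvRender]
          | some p =>
            simp only [Option.map_some, pvRender]
            have : i + 1 + p.1 = i + (p.1 + 1) := by omega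
            rw [this]
        · have hcond : i + 1 < cs.length ∧ cs[i+1]! ≠ '=' ∧ (cs[i+1]! ≠ '+' ∨ cs[i+1]! ≠ '-') := by
            refine ⟨h1, by simp [hget, he], ?_⟩
            by_cases hp : cs[i+1]! = '+'
            · right; simp [hp]
            · left; exact hp
          rw [if_pos hcond, List.nil_append]
          rw [hdrop, pvRegexSearch]
          have hc2 : (cs[i] ∈ ['+', '-', '*', '/', '%']) ∧
              ((cs.drop (i+1)).head? = none ∨ (cs.drop (i+1)).head? ≠ some '=') := by
            refine ⟨hop, Or.inr ?_⟩
            simp [hhead, he]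
          rw [if_pos hc2]
          simp [pvRender]
      · have hend : i + 1 = cs.length := by omega
        have hcond : ¬ (i + 1 < cs.length ∧ cs[i+1]! ≠ '=' ∧ (cs[i+1]! ≠ '+' ∨ cs[i+1]! ≠ '-')) := by
          simp [h1]
        rw [if_neg hcond]
        simp only [hend, if_true, List.nil_append]
        have hdone : pvLoopA cs (i + 2)
            [("OPERADOR_ARITMETICO", (cs[i]).toString, (i : Int), (i : Int))] =
            [("OPERADOR_ARITMETICO", (cs[i]).toString, (i : Int), (i : Int))] := by
          rw [pvLoopA]
          have : ¬ i + 2 < cs.length := by omega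
          simp [this]
        rw [hdone]
        have hnil : cs.drop (i+1) = [] := by
          rw [List.drop_eq_nil_iff]; omega
        rw [hdrop, pvRegexSearch, hnil]
        simp [hop, pvRender]
    · simp only [hop, if_false]
      rw [ih (cs.length - (i+1)) (by omega) (i+1) rfl]
      rw [hdrop, pvRegexSearch]
      simp only [hop, false_and, if_false]
      cases hs : pvRegexSearch (cs.drop (i+1)) with
      | none => simp [pvRender]
      | some p =>
        simp only [Option.map_some, pvRender]
        have : i + 1 + p.1 = i + (p.1 + 1) := by omega
        rw [this]
  · have hnil : cs.drop i = [] := by rw [List.drop_eq_nil_iff]; omega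
    simp [h, hnil, pvRegexSearch, pvRender]

-- ===== VERDICT (by name: the statement is the Claim_ definition above) =====
theorem tipo_operador_aritmetico_spec : Claim_equal_tipo_operador_aritmetico := by
  intro entrada _
  unfold Spec_tipo_operador_aritmetico tipo_operador_aritmetico tipo_operador_aritmetico_alt
  rw [pvLoopA_eq_search]
  cases hs : pvRegexSearch (entrada.toList.drop 0) with
  | none =>
    simp only [List.drop_zero] at hs
    simp [hs, pvRender]
  | some p =>
    rcases p with ⟨j, c⟩
    simp only [List.drop_zero] at hs
    simp [hs, pvRender]
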